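-- pv_equiv track=rewrite | github.com/mwvgroup/SNData | SNData/_combine_data.py | _reduce_id_mapping
-- ===== SOURCE A (Python) =====
-- from copy import copy
--
-- def _reduce_id_mapping(id_list):
--     """Combine a list of sets by unioning any sets with shared elements
--
--     Args
--         id_list (list[tuple[str]]): List of object IDs to join
--
--     Returns:
--         A list of combined sets
--     """
--
--     old_id_list = copy(id_list)
--     new_id_list = []
--
--     while old_id_list:
--         first, *rest = old_id_list
--
--         lf = -1
--         while len(first) > lf:
--             lf = len(first)
--             rest2 = []
--             for r in rest:
--                 if len(first.intersection(r)) > 0: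
--                     first |= r
--
--                 else:
--                     rest2.append(r)
--
--             rest = rest2
--
--         new_id_list.append(first)
--         old_id_list = rest
--
--     return new_id_list
-- ===== SOURCE B (Python) =====
-- def _reduce_id_mapping(id_list):
--     """Combine a list of sets by unioning any sets with shared elements.
--
--     Worklist (depth-first) alternative: grow each component by moving
--     intersecting sets from the pool onto an explicit stack, instead of
--     re-sweeping the remainder to a fixed point.
--     """
--     pool = list(id_list)
--     out = []
--     while pool:
--         stack = [pool.pop(0)]
--         comp = set()
--         while stack:
--             s = stack.pop()
--             comp |= s
--             remaining = []
--             for r in pool: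
--                 if comp.isdisjoint(r):
--                     remaining.append(r)
--                 else:
--                     stack.append(r)
--             pool = remaining
--         out.append(comp)
--     return out
-- ===== Notes on version B (the rewrite author's own statement) =====
-- stated objective: alternative
-- what changed: Replaces A's sweep-to-fixpoint inner loop (repeated full passes over the remainder until the set size stops growing, tracked via lf) with an explicit worklist/stack DFS that moves each intersecting set from the pool onto the stack exactly once.
import Mathlib
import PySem

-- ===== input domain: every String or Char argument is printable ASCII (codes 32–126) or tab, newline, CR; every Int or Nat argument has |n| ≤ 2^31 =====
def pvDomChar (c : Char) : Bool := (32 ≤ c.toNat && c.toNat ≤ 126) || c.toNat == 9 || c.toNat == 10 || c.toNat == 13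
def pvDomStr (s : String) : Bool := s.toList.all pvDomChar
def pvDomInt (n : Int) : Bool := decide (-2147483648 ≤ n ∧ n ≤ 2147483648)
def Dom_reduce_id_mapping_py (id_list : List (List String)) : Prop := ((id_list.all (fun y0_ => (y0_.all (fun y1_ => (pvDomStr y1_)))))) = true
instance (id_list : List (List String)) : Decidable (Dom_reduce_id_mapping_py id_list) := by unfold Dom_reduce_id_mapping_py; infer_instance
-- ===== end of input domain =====

-- B replaces A's sweep-to-fixpoint inner loop by an explicit worklist (stack) DFS; equivalence is
-- about the RETURN value only (Python A mutates the caller's first set in place via `first |= r`).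
-- Both ports decode each argument set to its distinct-element list (PySem.Set.ofList) and render each
-- returned set in canonical sorted order: a Python set value has no observable element order.

-- ===== PORT A =====
-- canonical rendering of a returned set value (shared representation choice, not algorithm)
def pySetCanon (s : List String) : List String := PySem.List.sorted s (fun x => x)

-- one pass of A's inner `for r in rest` loop: absorb intersecting sets into `first`, keep the rest
def passA (first : List String) (rest : List (List String)) : List String × List (List String) :=
  match rest with
  | [] => (first, [])
  | r :: rs =>
    if 0 < (PySem.Set.inter first r).length then
      passA (PySem.Set.union first r) rs
    else
      ((passA first rs).1, r :: (passA first rs).2)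

-- A's `while len(first) > lf` loop; fuel (rest.length + 2 at the call site) only makes it total:
-- every continuing pass removed at least one set from `rest`
def satA (first : List String) (rest : List (List String)) (lf : Int) (fuel : Nat) :
    List String × List (List String) :=
  match fuel with
  | 0 => (first, rest)
  | fuel' + 1 =>
    if lf < (first.length : Int) then
      satA (passA first rest).1 (passA first rest).2 (first.length : Int) fuel'
    else (first, rest)

-- A's outer `while old_id_list` loop; fuel (the list length) only makes it total
def outerA (old : List (List String)) (fuel : Nat) : List (List String) :=
  match fuel, old with
  | 0, _ => []
  | _, [] => []
  | fuel' + 1, first :: rest =>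
    (satA first rest (-1) (rest.length + 2)).1 ::
      outerA (satA first rest (-1) (rest.length + 2)).2 fuel'

def reduce_id_mapping_py (id_list : List (List String)) : List (List String) :=
  (outerA (id_list.map PySem.Set.ofList) id_list.length).map pySetCanon

-- ===== PORT B =====
-- B's `for r in pool` loop: split the pool into (remaining, moved-to-stack)
def moveB (comp : List String) (pool : List (List String)) :
    List (List String) × List (List String) :=
  match pool with
  | [] => ([], [])
  | r :: rs =>
    if PySem.Set.isdisjoint comp r then
      (r :: (moveB comp rs).1, (moveB comp rs).2)
    else
      ((moveB comp rs).1, r :: (moveB comp rs).2)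

-- B's `while stack` loop (stack head = top; Python appends/pops at the end, so the sets moved from
-- the pool are pushed reversed); fuel (stack.length + pool.length) only makes it total
def satB (comp : List String) (stack pool : List (List String)) (fuel : Nat) :
    List String × List (List String) :=
  match fuel, stack with
  | 0, _ => (comp, pool)
  | _, [] => (comp, pool)
  | fuel' + 1, s :: st =>
    satB (PySem.Set.union comp s)
      ((moveB (PySem.Set.union comp s) pool).2.reverse ++ st)
      (moveB (PySem.Set.union comp s) pool).1 fuel'

-- B's outer `while pool` loop; fuel (the list length) only makes it total
def outerB (pool : List (List String)) (fuel : Nat) : List (List String) :=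
  match fuel, pool with
  | 0, _ => []
  | _, [] => []
  | fuel' + 1, s :: ps =>
    (satB [] [s] ps (ps.length + 1)).1 :: outerB (satB [] [s] ps (ps.length + 1)).2 fuel'

def reduce_id_mapping_py_alt (id_list : List (List String)) : List (List String) :=
  (outerB (id_list.map PySem.Set.ofList) id_list.length).map pySetCanon

-- ===== PRECONDITION & SPEC =====
def Spec_reduce_id_mapping_py (id_list : List (List String)) (out : List (List String)) : Prop := out = reduce_id_mapping_py_alt id_list
instance (id_list : List (List String)) (out : List (List String)) : Decidable (Spec_reduce_id_mapping_py id_list out) := by unfold Spec_reduce_id_mapping_py; infer_instance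

-- ===== CLAIM (what is proved, stated in full; the proofs are below) =====
def Claim_equal_reduce_id_mapping_py : Prop := ∀ (id_list : List (List String)), Dom_reduce_id_mapping_py id_list → Spec_reduce_id_mapping_py id_list (reduce_id_mapping_py id_list)

-- ===== LEMMAS AND PROOFS =====

-- Bool test "r is disjoint from G" used to characterise both survivors lists
def disB (G r : List String) : Bool := r.all (fun x => !G.contains x)

theorem disB_true_iff (G r : List String) : disB G r = true ↔ ∀ x ∈ r, x ∉ G := by
  simp [disB, PySem.Set.contains_iff]

theorem disB_eq_false_of_mem {G r : List String} {y : String} (hyr : y ∈ r) (hyG : y ∈ G) :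
    disB G r = false := by
  rcases h : disB G r with _ | _
  · rfl
  · exact absurd hyG ((disB_true_iff G r).mp h y hyr)

theorem disB_congr {G G' : List String} (h : ∀ x, x ∈ G ↔ x ∈ G') (r : List String) :
    disB G r = disB G' r := by
  by_cases hG : ∀ x ∈ r, x ∉ G
  · rw [(disB_true_iff G r).mpr hG,
      (disB_true_iff G' r).mpr (fun x hx hc => hG x hx ((h x).mpr hc))]
  · push_neg at hG
    rcases hG with ⟨x, hxr, hxG⟩
    rw [disB_eq_false_of_mem hxr hxG, disB_eq_false_of_mem hxr ((h x).mp hxG)]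

theorem inter_pos_iff (F r : List String) :
    0 < (PySem.Set.inter F r).length ↔ ∃ y, y ∈ F ∧ y ∈ r := by
  rw [List.length_pos_iff_exists_mem]
  constructor
  · rintro ⟨y, hy⟩
    exact ⟨y, (PySem.Set.mem_inter F r y).mp hy⟩
  · rintro ⟨y, hyF, hyr⟩
    exact ⟨y, (PySem.Set.mem_inter F r y).mpr ⟨hyF, hyr⟩⟩

-- the element-closure of a base predicate b through the sets of R
inductive InClo (b : String → Prop) (R : List (List String)) : String → Prop
  | base {x : String} : b x → InClo b R x
  | step {r : List String} {x y : String} :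
      r ∈ R → y ∈ r → InClo b R y → x ∈ r → InClo b R x

theorem InClo_mono {b b' : String → Prop} {R R' : List (List String)}
    (hb : ∀ x, b' x → InClo b R x) (hR : ∀ r ∈ R', r ∈ R) {x : String} :
    InClo b' R' x → InClo b R x := by
  intro h
  induction h with
  | base hx => exact hb _ hx
  | step hr hy _ hx ih => exact InClo.step (hR _ hr) hy ih hx

theorem InClo_expand {b b' : String → Prop} {R R' : List (List String)}
    (hb : ∀ x, b x → b' x) (hR : ∀ r ∈ R, r ∈ R' ∨ ∀ z ∈ r, b' z) {x : String} :
    InClo b R x → InClo b' R' x := by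
  intro h
  induction h with
  | base hx => exact InClo.base (hb _ hx)
  | @step r x y hr hy _ hx ih =>
    rcases hR r hr with h' | h'
    · exact InClo.step h' hy ih hx
    · exact InClo.base (h' x hx)

theorem InClo_congr_base {b b' : String → Prop} {R : List (List String)}
    (h : ∀ x, b x ↔ b' x) (x : String) : InClo b R x ↔ InClo b' R x :=
  ⟨InClo_expand (fun x hx => (h x).mp hx) (fun r hr => Or.inl hr),
   InClo_expand (fun x hx => (h x).mpr hx) (fun r hr => Or.inl hr)⟩

theorem InClo_fix {b : String → Prop} {R : List (List String)}
    (h : ∀ r ∈ R, (∀ y ∈ r, ¬ b y) ∨ (∀ z ∈ r, b z)) {x : String} :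
    InClo b R x → b x := by
  intro hc
  induction hc with
  | base hx => exact hx
  | @step r x y hr hy hcy hx ih =>
    rcases h r hr with h' | h'
    · exact absurd ih (h' y hy)
    · exact h' x hx

-- ---- passA characterisation ----

theorem passA_ext (R : List (List String)) (F : List String) :
    ∃ t, (passA F R).1 = F ++ t := by
  induction R generalizing F with
  | nil => exact ⟨[], by simp [passA]⟩
  | cons r rs ih =>
    by_cases habs : 0 < (PySem.Set.inter F r).length
    · rcases ih (PySem.Set.union F r) with ⟨t, ht⟩
      have hu : PySem.Set.union F r
          = F ++ List.filter (fun y => !PySem.Set.contains F y) (PySem.Set.ofList r) :=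
        PySem.Set.update_eq_append_filter F r
      refine ⟨List.filter (fun y => !PySem.Set.contains F y) (PySem.Set.ofList r) ++ t, ?_⟩
      rw [show passA F (r :: rs) = passA (PySem.Set.union F r) rs from by
        simp only [passA, if_pos habs], ht, hu, List.append_assoc]
    · rcases ih F with ⟨t, ht⟩
      exact ⟨t, by simp only [passA, if_neg habs, ht]⟩

theorem passA_subF (R : List (List String)) (F : List String) :
    ∀ x ∈ F, x ∈ (passA F R).1 := by
  intro x hx
  rcases passA_ext R F with ⟨t, ht⟩
  rw [ht]
  exact List.mem_append_left _ hx

theorem passA_mem (R : List (List String)) (F : List String) :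
    ∀ x ∈ (passA F R).1, InClo (· ∈ F) R x := by
  induction R generalizing F with
  | nil => intro x hx; exact InClo.base hx
  | cons r rs ih =>
    intro x hx
    by_cases habs : 0 < (PySem.Set.inter F r).length
    · rw [show passA F (r :: rs) = passA (PySem.Set.union F r) rs from by
        simp only [passA, if_pos habs]] at hx
      refine InClo_mono ?_ (fun r' hr' => List.mem_cons_of_mem _ hr') (ih _ x hx)
      intro z hz
      rcases (PySem.Set.mem_union F r z).mp hz with hzF | hzr
      · exact InClo.base hzF
      · rcases (inter_pos_iff F r).mp habs with ⟨y, hyF, hyr⟩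
        exact InClo.step List.mem_cons_self hyr (InClo.base hyF) hzr
    · rw [show (passA F (r :: rs)).1 = (passA F rs).1 from by
        simp only [passA, if_neg habs]] at hx
      exact InClo_mono (fun z hz => InClo.base hz)
        (fun r' hr' => List.mem_cons_of_mem _ hr') (ih F x hx)

theorem passA_sub (R : List (List String)) (F : List String) :
    ∀ r ∈ (passA F R).2, r ∈ R := by
  induction R generalizing F with
  | nil => intro r hr; simp [passA] at hr
  | cons r rs ih =>
    intro r' hr'
    by_cases habs : 0 < (PySem.Set.inter F r).length
    · rw [show passA F (r :: rs) = passA (PySem.Set.union F r) rs from by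
        simp only [passA, if_pos habs]] at hr'
      exact List.mem_cons_of_mem _ (ih _ _ hr')
    · rw [show (passA F (r :: rs)).2 = r :: (passA F rs).2 from by
        simp only [passA, if_neg habs]] at hr'
      rcases List.mem_cons.mp hr' with rfl | hr''
      · exact List.mem_cons_self
      · exact List.mem_cons_of_mem _ (ih F _ hr'')

theorem passA_absorbed (R : List (List String)) (F : List String) :
    ∀ r ∈ R, r ∈ (passA F R).2 ∨
      ((∀ z ∈ r, z ∈ (passA F R).1) ∧ ∃ y, y ∈ r ∧ y ∈ (passA F R).1) := by
  induction R generalizing F with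
  | nil => intro r hr; cases hr
  | cons r rs ih =>
    intro r' hr'
    by_cases habs : 0 < (PySem.Set.inter F r).length
    · rw [show passA F (r :: rs) = passA (PySem.Set.union F r) rs from by
        simp only [passA, if_pos habs]]
      rcases List.mem_cons.mp hr' with heq | hr''
      · subst heq
        right
        constructor
        · intro z hz
          exact passA_subF _ _ _ ((PySem.Set.mem_union F r' z).mpr (Or.inr hz))
        · rcases (inter_pos_iff F r').mp habs with ⟨y, hyF, hyr⟩
          exact ⟨y, hyr, passA_subF _ _ _ ((PySem.Set.mem_union F r' y).mpr (Or.inl hyF))⟩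
      · exact ih (PySem.Set.union F r) r' hr''
    · rw [show passA F (r :: rs) = ((passA F rs).1, r :: (passA F rs).2) from by
        simp only [passA, if_neg habs]]
      rcases List.mem_cons.mp hr' with rfl | hr''
      · exact Or.inl List.mem_cons_self
      · rcases ih F r' hr'' with h | h
        · exact Or.inl (List.mem_cons_of_mem _ h)
        · exact Or.inr h

theorem passA_filter (R : List (List String)) (F G : List String)
    (hG : ∀ x ∈ (passA F R).1, x ∈ G) :
    R.filter (disB G) = (passA F R).2.filter (disB G) := by
  induction R generalizing F with
  | nil => simp [passA]
  | cons r rs ih =>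
    by_cases habs : 0 < (PySem.Set.inter F r).length
    · rw [show passA F (r :: rs) = passA (PySem.Set.union F r) rs from by
        simp only [passA, if_pos habs]] at hG ⊢
      rcases (inter_pos_iff F r).mp habs with ⟨y, hyF, hyr⟩
      have hyG : y ∈ G :=
        hG y (passA_subF _ _ _ ((PySem.Set.mem_union F r y).mpr (Or.inl hyF)))
      rw [List.filter_cons_of_neg (by simp [disB_eq_false_of_mem hyr hyG])]
      exact ih _ hG
    · rw [show passA F (r :: rs) = ((passA F rs).1, r :: (passA F rs).2) from by
        simp only [passA, if_neg habs]] at hG ⊢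
      simp only [List.filter_cons]
      rw [ih F hG]
  
theorem passA_len (R : List (List String)) (F : List String) :
    (passA F R).2.length ≤ R.length := by
  induction R generalizing F with
  | nil => simp [passA]
  | cons r rs ih =>
    by_cases habs : 0 < (PySem.Set.inter F r).length
    · rw [show passA F (r :: rs) = passA (PySem.Set.union F r) rs from by
        simp only [passA, if_pos habs]]
      exact Nat.le_succ_of_le (ih _)
    · rw [show passA F (r :: rs) = ((passA F rs).1, r :: (passA F rs).2) from by
        simp only [passA, if_neg habs]]
      simpa using Nat.succ_le_succ (ih F)

theorem passA_prog (R : List (List String)) (F : List String) :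
    ((passA F R).1 = F ∧ (passA F R).2 = R) ∨ (passA F R).2.length < R.length := by
  induction R generalizing F with
  | nil => left; simp [passA]
  | cons r rs ih =>
    by_cases habs : 0 < (PySem.Set.inter F r).length
    · rw [show passA F (r :: rs) = passA (PySem.Set.union F r) rs from by
        simp only [passA, if_pos habs]]
      right
      exact Nat.lt_succ_of_le (passA_len rs _)
    · rw [show passA F (r :: rs) = ((passA F rs).1, r :: (passA F rs).2) from by
        simp only [passA, if_neg habs]]
      rcases ih F with ⟨h1, h2⟩ | h
      · left; simp [h1, h2]
      · right; simpa using Nat.succ_lt_succ h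

theorem passA_stable (R : List (List String)) (F : List String)
    (hfix : (passA F R).1 = F) : ∀ r ∈ (passA F R).2, disB F r = true := by
  induction R generalizing F with
  | nil => intro r hr; simp [passA] at hr
  | cons r rs ih =>
    by_cases habs : 0 < (PySem.Set.inter F r).length
    · rw [show passA F (r :: rs) = passA (PySem.Set.union F r) rs from by
        simp only [passA, if_pos habs]] at hfix ⊢
      -- from (passA (F∪r) rs).1 = F and prefix-extension, F∪r = F
      have hun : PySem.Set.union F r = F := by
        rcases passA_ext rs (PySem.Set.union F r) with ⟨t, ht⟩
        have hFr : PySem.Set.union F r = F ++ List.filter (fun y => !F.contains y) (PySem.Set.ofList r) :=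
          PySem.Set.update_eq_append_filter F r
        have : F ++ (List.filter (fun y => !F.contains y) (PySem.Set.ofList r) ++ t) = F := by
          rw [← List.append_assoc, ← hFr, ← ht, hfix]
        have hlen := congrArg List.length this
        simp only [List.length_append] at hlen
        have h0 : (List.filter (fun y => !F.contains y) (PySem.Set.ofList r)).length = 0 := by omega
        rw [hFr, List.length_eq_zero_iff.mp h0, List.append_nil]
      rw [hun] at hfix ⊢
      exact ih F hfix
    · rw [show passA F (r :: rs) = ((passA F rs).1, r :: (passA F rs).2) from by
        simp only [passA, if_neg habs]] at hfix ⊢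
      intro r' hr'
      rcases List.mem_cons.mp hr' with heq | hr''
      · subst heq
        rw [disB_true_iff]
        intro x hxr hxF
        exact habs ((inter_pos_iff F r').mpr ⟨x, hxF, hxr⟩)
      · exact ih F hfix r' hr''

theorem passA_nodup (R : List (List String)) (F : List String) (h : F.Nodup) :
    (passA F R).1.Nodup := by
  induction R generalizing F with
  | nil => simpa [passA]
  | cons r rs ih =>
    by_cases habs : 0 < (PySem.Set.inter F r).length
    · rw [show passA F (r :: rs) = passA (PySem.Set.union F r) rs from by
        simp only [passA, if_pos habs]]
      exact ih _ (PySem.Set.nodup_union F r h)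
    · rw [show (passA F (r :: rs)).1 = (passA F rs).1 from by
        simp only [passA, if_neg habs]]
      exact ih F h

-- ---- satA characterisation ----

theorem satA_spec (fuel : Nat) :
    ∀ (F : List String) (R : List (List String)) (lf : Int),
    R.length + 2 ≤ fuel → lf < (F.length : Int) → F.Nodup →
    (∀ x, x ∈ (satA F R lf fuel).1 ↔ InClo (· ∈ F) R x) ∧
    (satA F R lf fuel).2 = R.filter (disB (satA F R lf fuel).1) ∧
    (satA F R lf fuel).1.Nodup := by
  induction fuel with
  | zero => intro F R lf hfuel _ _; omega
  | succ f ih =>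
    intro F R lf hfuel hlf hnd
    simp only [satA]
    rw [if_pos hlf]
    by_cases hfix : (passA F R).1 = F
    · rw [hfix]
      rcases Nat.exists_eq_succ_of_ne_zero (by omega : f ≠ 0) with ⟨f', rfl⟩
      simp only [satA]
      rw [if_neg (lt_irrefl ((F.length : Int)))]
      refine ⟨?_, ?_, hnd⟩
      · intro x
        constructor
        · intro hx
          exact InClo.base hx
        · refine InClo_fix ?_
          intro r hr
          rcases passA_absorbed R F r hr with hsurv | ⟨hsub, _⟩
          · left
            intro y hy
            exact (disB_true_iff F r).mp (passA_stable R F hfix r hsurv) y hy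
          · right
            intro z hz
            have := hsub z hz
            rwa [hfix] at this
      · refine ((passA_filter R F F ?_).trans ?_).symm
        · intro x hx; rwa [hfix] at hx
        · exact List.filter_eq_self.mpr (passA_stable R F hfix)
    · have hlt : (passA F R).2.length < R.length := by
        rcases passA_prog R F with ⟨h1, _⟩ | h
        · exact absurd h1 hfix
        · exact h
      have hflen : (F.length : Int) < ((passA F R).1.length : Int) := by
        rcases passA_ext R F with ⟨t, ht⟩
        have htne : t ≠ [] := by
          intro h0
          exact hfix (by rw [ht, h0, List.append_nil])
        have : 0 < t.length := List.length_pos_iff.mpr htne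
        rw [ht, List.length_append]
        exact_mod_cast by omega
      obtain ⟨hmem, hfilt, hnd'⟩ :=
        ih (passA F R).1 (passA F R).2 (F.length : Int) (by omega) hflen
          (passA_nodup R F hnd)
      have hbridge : ∀ x,
          InClo (· ∈ (passA F R).1) (passA F R).2 x ↔ InClo (· ∈ F) R x := by
        intro x
        constructor
        · exact InClo_mono (passA_mem R F) (passA_sub R F)
        · refine InClo_expand (passA_subF R F) ?_
          intro r hr
          exact (passA_absorbed R F r hr).imp id (fun h => h.1)
      refine ⟨fun x => (hmem x).trans (hbridge x), ?_, hnd'⟩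
      rw [hfilt]
      refine (passA_filter R F _ ?_).symm
      intro x hx
      exact (hmem x).mpr (InClo.base hx)

-- ---- moveB characterisation ----

theorem moveB_step_pos (C : List String) (r : List String) (rs : List (List String))
    (h : PySem.Set.isdisjoint C r = true) :
    moveB C (r :: rs) = (r :: (moveB C rs).1, (moveB C rs).2) := by
  simp only [moveB, if_pos h]

theorem moveB_step_neg (C : List String) (r : List String) (rs : List (List String))
    (h : ¬ PySem.Set.isdisjoint C r = true) :
    moveB C (r :: rs) = ((moveB C rs).1, r :: (moveB C rs).2) := by
  simp only [moveB, if_neg h]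

theorem moveB_kept_sub (P : List (List String)) (C : List String) :
    ∀ r ∈ (moveB C P).1, r ∈ P := by
  induction P with
  | nil => intro r hr; simp [moveB] at hr
  | cons r rs ih =>
    intro r' hr'
    by_cases hd : PySem.Set.isdisjoint C r = true
    · rw [moveB_step_pos C r rs hd] at hr'
      rcases List.mem_cons.mp hr' with heq | hr''
      · exact heq ▸ List.mem_cons_self
      · exact List.mem_cons_of_mem _ (ih r' hr'')
    · rw [moveB_step_neg C r rs hd] at hr'
      exact List.mem_cons_of_mem _ (ih r' hr')

theorem moveB_moved_sub (P : List (List String)) (C : List String) :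
    ∀ r ∈ (moveB C P).2, r ∈ P := by
  induction P with
  | nil => intro r hr; simp [moveB] at hr
  | cons r rs ih =>
    intro r' hr'
    by_cases hd : PySem.Set.isdisjoint C r = true
    · rw [moveB_step_pos C r rs hd] at hr'
      exact List.mem_cons_of_mem _ (ih r' hr')
    · rw [moveB_step_neg C r rs hd] at hr'
      rcases List.mem_cons.mp hr' with heq | hr''
      · exact heq ▸ List.mem_cons_self
      · exact List.mem_cons_of_mem _ (ih r' hr'')

theorem moveB_kept_dis (P : List (List String)) (C : List String) :
    ∀ r ∈ (moveB C P).1, PySem.Set.isdisjoint C r = true := by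
  induction P with
  | nil => intro r hr; simp [moveB] at hr
  | cons r rs ih =>
    intro r' hr'
    by_cases hd : PySem.Set.isdisjoint C r = true
    · rw [moveB_step_pos C r rs hd] at hr'
      rcases List.mem_cons.mp hr' with heq | hr''
      · exact heq ▸ hd
      · exact ih r' hr''
    · rw [moveB_step_neg C r rs hd] at hr'
      exact ih r' hr'

theorem moveB_moved_piv (P : List (List String)) (C : List String) :
    ∀ r ∈ (moveB C P).2, ∃ y, y ∈ C ∧ y ∈ r := by
  induction P with
  | nil => intro r hr; simp [moveB] at hr
  | cons r rs ih =>
    intro r' hr'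
    by_cases hd : PySem.Set.isdisjoint C r = true
    · rw [moveB_step_pos C r rs hd] at hr'
      exact ih r' hr'
    · rw [moveB_step_neg C r rs hd] at hr'
      rcases List.mem_cons.mp hr' with heq | hr''
      · subst heq
        by_contra hno
        push_neg at hno
        exact hd ((PySem.Set.isdisjoint_iff C r').mpr (fun y hy hc => hno y hy hc))
      · exact ih r' hr''

theorem moveB_cover (P : List (List String)) (C : List String) :
    ∀ r ∈ P, r ∈ (moveB C P).1 ∨ r ∈ (moveB C P).2 := by
  induction P with
  | nil => intro r hr; cases hr
  | cons r rs ih =>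
    intro r' hr'
    by_cases hd : PySem.Set.isdisjoint C r = true
    · rw [moveB_step_pos C r rs hd]
      rcases List.mem_cons.mp hr' with heq | hr''
      · exact Or.inl (heq ▸ List.mem_cons_self)
      · exact (ih r' hr'').imp (List.mem_cons_of_mem _) id
    · rw [moveB_step_neg C r rs hd]
      rcases List.mem_cons.mp hr' with heq | hr''
      · exact Or.inr (heq ▸ List.mem_cons_self)
      · exact (ih r' hr'').imp id (List.mem_cons_of_mem _)

theorem moveB_filter (P : List (List String)) (C : List String) (p : List String → Bool)
    (hp : ∀ r ∈ (moveB C P).2, p r = false) :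
    P.filter p = (moveB C P).1.filter p := by
  induction P with
  | nil => simp [moveB]
  | cons r rs ih =>
    by_cases hd : PySem.Set.isdisjoint C r = true
    · rw [moveB_step_pos C r rs hd] at hp ⊢
      simp only [List.filter_cons]
      rw [ih hp]
    · rw [moveB_step_neg C r rs hd] at hp ⊢
      rw [List.filter_cons_of_neg
        (by simp [hp r List.mem_cons_self])]
      exact ih (fun r' hr' => hp r' (List.mem_cons_of_mem _ hr'))

theorem moveB_len (P : List (List String)) (C : List String) :
    (moveB C P).1.length + (moveB C P).2.length = P.length := by
  induction P with
  | nil => simp [moveB]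
  | cons r rs ih =>
    by_cases hd : PySem.Set.isdisjoint C r = true
    · rw [moveB_step_pos C r rs hd]
      simp only [List.length_cons]
      omega
    · rw [moveB_step_neg C r rs hd]
      simp only [List.length_cons]
      omega

-- ---- satB characterisation ----

theorem satB_spec (fuel : Nat) :
    ∀ (comp : List String) (stack pool : List (List String)),
    stack.length + pool.length ≤ fuel → comp.Nodup →
    (∀ r ∈ pool, PySem.Set.isdisjoint comp r = true) →
    (∀ x, x ∈ (satB comp stack pool fuel).1 ↔
        InClo (fun x => x ∈ comp ∨ ∃ s, s ∈ stack ∧ x ∈ s) pool x) ∧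
    (satB comp stack pool fuel).2 = pool.filter (disB (satB comp stack pool fuel).1) ∧
    (satB comp stack pool fuel).1.Nodup := by
  induction fuel with
  | zero =>
    intro comp stack pool hfuel hnd hinv
    have hs : stack = [] := List.eq_nil_of_length_eq_zero (by omega)
    have hp : pool = [] := List.eq_nil_of_length_eq_zero (by omega)
    subst hs; subst hp
    simp only [satB]
    refine ⟨?_, by simp, hnd⟩
    intro x
    constructor
    · intro hx
      exact InClo.base (Or.inl hx)
    · intro hx
      rcases InClo_fix (by intro r hr; cases hr) hx with hc | ⟨s, hs, _⟩
      · exact hc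
      · cases hs
  | succ f ih =>
    intro comp stack pool hfuel hnd hinv
    cases stack with
    | nil =>
      simp only [satB]
      have hfix : ∀ r ∈ pool,
          (∀ y ∈ r, ¬ (y ∈ comp ∨ ∃ s, s ∈ ([] : List (List String)) ∧ y ∈ s)) ∨
          (∀ z ∈ r, z ∈ comp ∨ ∃ s, s ∈ ([] : List (List String)) ∧ z ∈ s) := by
        intro r hr
        left
        intro y hy hby
        rcases hby with hyc | ⟨s, hs, _⟩
        · exact (PySem.Set.isdisjoint_iff comp r).mp (hinv r hr) y hyc hy
        · cases hs
      refine ⟨?_, ?_, hnd⟩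
      · intro x
        constructor
        · intro hx
          exact InClo.base (Or.inl hx)
        · intro hx
          rcases InClo_fix hfix hx with hc | ⟨s, hs, _⟩
          · exact hc
          · cases hs
      · refine (List.filter_eq_self.mpr ?_).symm
        intro r hr
        rw [disB_true_iff]
        intro x hxr hxc
        exact (PySem.Set.isdisjoint_iff comp r).mp (hinv r hr) x hxc hxr
    | cons s st =>
      simp only [satB]
      have hlen := moveB_len pool (PySem.Set.union comp s)
      obtain ⟨hmem, hfilt, hnd'⟩ :=
        ih (PySem.Set.union comp s)
          ((moveB (PySem.Set.union comp s) pool).2.reverse ++ st)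
          (moveB (PySem.Set.union comp s) pool).1
          (by
            simp only [List.length_append, List.length_reverse]
            simp only [List.length_cons] at hfuel
            omega)
          (PySem.Set.nodup_union comp s hnd)
          (moveB_kept_dis pool (PySem.Set.union comp s))
      have hC'base : ∀ y, y ∈ PySem.Set.union comp s →
          InClo (fun x => x ∈ comp ∨ ∃ s', s' ∈ s :: st ∧ x ∈ s') pool y := by
        intro y hy
        rcases (PySem.Set.mem_union comp s y).mp hy with hyc | hys
        · exact InClo.base (Or.inl hyc)
        · exact InClo.base (Or.inr ⟨s, List.mem_cons_self, hys⟩)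
      have hbridge : ∀ x,
          InClo (fun x => x ∈ PySem.Set.union comp s ∨
              ∃ s', s' ∈ (moveB (PySem.Set.union comp s) pool).2.reverse ++ st ∧ x ∈ s')
            (moveB (PySem.Set.union comp s) pool).1 x ↔
          InClo (fun x => x ∈ comp ∨ ∃ s', s' ∈ s :: st ∧ x ∈ s') pool x := by
        intro x
        constructor
        · refine InClo_mono ?_ (moveB_kept_sub pool _)
          intro z hz
          rcases hz with hzC | ⟨s', hs', hzs'⟩
          · exact hC'base z hzC
          · rcases List.mem_append.mp hs' with hmv | hst
            · have hs'pool := moveB_moved_sub pool _ s' (List.mem_reverse.mp hmv)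
              rcases moveB_moved_piv pool _ s' (List.mem_reverse.mp hmv) with ⟨y, hyC, hys'⟩
              exact InClo.step hs'pool hys' (hC'base y hyC) hzs'
            · exact InClo.base (Or.inr ⟨s', List.mem_cons_of_mem _ hst, hzs'⟩)
        · refine InClo_expand ?_ ?_
          · intro z hz
            rcases hz with hzc | ⟨s', hs', hzs'⟩
            · exact Or.inl ((PySem.Set.mem_union comp s z).mpr (Or.inl hzc))
            · rcases List.mem_cons.mp hs' with heq | hst
              · exact Or.inl ((PySem.Set.mem_union comp s z).mpr (Or.inr (heq ▸ hzs')))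
              · exact Or.inr ⟨s', List.mem_append_right _ hst, hzs'⟩
          · intro r hr
            rcases moveB_cover pool (PySem.Set.union comp s) r hr with hk | hm
            · exact Or.inl hk
            · right
              intro z hz
              exact Or.inr ⟨r, List.mem_append_left _ (List.mem_reverse.mpr hm), hz⟩
      refine ⟨fun x => (hmem x).trans (hbridge x), ?_, hnd'⟩
      rw [hfilt]
      refine (moveB_filter pool (PySem.Set.union comp s) _ ?_).symm
      intro r hr
      rcases moveB_moved_piv pool _ r hr with ⟨y, hyC, hyr⟩
      have hyO : y ∈ (satB (PySem.Set.union comp s)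
          ((moveB (PySem.Set.union comp s) pool).2.reverse ++ st)
          (moveB (PySem.Set.union comp s) pool).1 f).1 :=
        (hmem y).mpr (InClo.base (Or.inl hyC))
      exact disB_eq_false_of_mem hyr hyO

-- ---- outer loops agree ----

theorem outerB_nil (fb : Nat) : outerB [] fb = [] := by
  cases fb <;> simp [outerB]

theorem outer_eq (fa : Nat) :
    ∀ (pool : List (List String)) (fb : Nat),
    pool.length ≤ fa → pool.length ≤ fb → (∀ s ∈ pool, s.Nodup) →
    (outerA pool fa).map pySetCanon = (outerB pool fb).map pySetCanon := by
  induction fa with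
  | zero =>
    intro pool fb hfa _ _
    have : pool = [] := List.eq_nil_of_length_eq_zero (by omega)
    subst this
    simp [outerA, outerB_nil]
  | succ f ih =>
    intro pool fb hfa hfb hnds
    cases pool with
    | nil => simp [outerA, outerB_nil]
    | cons s ps =>
      cases fb with
      | zero => simp at hfb
      | succ g =>
        obtain ⟨hAmem, hAfilt, hAnd⟩ :=
          satA_spec (ps.length + 2) s ps (-1) (le_refl _)
            (lt_of_lt_of_le neg_one_lt_zero (Int.natCast_nonneg _)) (hnds s List.mem_cons_self)
        obtain ⟨hBmem, hBfilt, hBnd⟩ :=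
          satB_spec (ps.length + 1) [] [s] ps (by simp only [List.length_cons, List.length_nil]; omega) List.nodup_nil
            (by
              intro r _
              rw [PySem.Set.isdisjoint_iff]
              intro x hx
              cases hx)
        have hmem : ∀ x, x ∈ (satA s ps (-1) (ps.length + 2)).1 ↔
            x ∈ (satB [] [s] ps (ps.length + 1)).1 := by
          intro x
          refine (hAmem x).trans (Iff.trans ?_ (hBmem x).symm)
          refine InClo_congr_base ?_ x
          intro z
          constructor
          · intro hz
            exact Or.inr ⟨s, List.mem_cons_self, hz⟩
          · intro hz
            rcases hz with hz | ⟨s', hs', hzs'⟩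
            · cases hz
            · rcases List.mem_cons.mp hs' with heq | h0
              · exact heq ▸ hzs'
              · cases h0
        have hcanon : pySetCanon (satA s ps (-1) (ps.length + 2)).1 =
            pySetCanon (satB [] [s] ps (ps.length + 1)).1 := by
          unfold pySetCanon
          exact PySem.List.sorted_eq_sorted_of_perm _ _ _ (fun a b h => h)
            ((List.perm_ext_iff_of_nodup hAnd hBnd).mpr hmem)
        have htail : (satA s ps (-1) (ps.length + 2)).2 =
            (satB [] [s] ps (ps.length + 1)).2 := by
          rw [hAfilt, hBfilt]
          exact List.filter_congr (fun r _ => disB_congr hmem r)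
        simp only [outerA, outerB, List.map_cons]
        rw [hcanon, htail]
        refine congrArg _ (ih (satB [] [s] ps (ps.length + 1)).2 g ?_ ?_ ?_)
        · rw [hBfilt]
          have := List.length_filter_le (disB (satB [] [s] ps (ps.length + 1)).1) ps
          simp only [List.length_cons] at hfa
          omega
        · rw [hBfilt]
          have := List.length_filter_le (disB (satB [] [s] ps (ps.length + 1)).1) ps
          simp only [List.length_cons] at hfb
          omega
        · intro r hr
          rw [hBfilt] at hr
          exact hnds r (List.mem_cons_of_mem _ (List.mem_filter.mp hr).1)

-- ===== VERDICT (by name: the statement is the Claim_ definition above) =====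
theorem reduce_id_mapping_py_spec : Claim_equal_reduce_id_mapping_py := by
  intro id_list _
  unfold Spec_reduce_id_mapping_py reduce_id_mapping_py reduce_id_mapping_py_alt
  refine outer_eq id_list.length (id_list.map PySem.Set.ofList) id_list.length
    (by simp) (by simp) ?_
  intro s hs
  rcases List.mem_map.mp hs with ⟨l, _, rfl⟩
  exact PySem.Set.nodup_ofList l
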